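-- pv_equiv track=rewrite | github.com/dsweet99/dryer | test/benchmark_data/module_029.py | compute_29_6
-- ===== SOURCE A (Python) =====
-- def compute_29_6(a, b, c):
--     x = a * 512 + b * 421
--     y = c * 352 - a * 273
--     for i in range(20):
--         x = x + i * 94
--         y = y - i * 42
--         if x > 7960:
--             x = x % 2480
--     return x + y + 175
-- ===== SOURCE B (Python) =====
-- def compute_29_6(a, b, c):
--     # Tail-recursive step function tracks only x; y's loop effect is the
--     # constant -42*(0+..+19) = -7980, folded with +175 into -7805.
--     def go(x, i):
--         if i >= 20:
--             return x
--         x = x + i * 94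
--         if x > 7960:
--             x = x % 2480
--         return go(x, i + 1)
--     return go(a * 512 + b * 421, 0) + c * 352 - a * 273 - 7805
-- ===== Notes on version B (the rewrite author's own statement) =====
-- stated objective: alternative
-- what changed: B replaces A's paired (x,y) fold with a tail-recursive helper over x alone; y's loop effect is the constant -42*sum(0..19)=-7980, folded with +175 into a closed-form tail -7805.
import Mathlib
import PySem

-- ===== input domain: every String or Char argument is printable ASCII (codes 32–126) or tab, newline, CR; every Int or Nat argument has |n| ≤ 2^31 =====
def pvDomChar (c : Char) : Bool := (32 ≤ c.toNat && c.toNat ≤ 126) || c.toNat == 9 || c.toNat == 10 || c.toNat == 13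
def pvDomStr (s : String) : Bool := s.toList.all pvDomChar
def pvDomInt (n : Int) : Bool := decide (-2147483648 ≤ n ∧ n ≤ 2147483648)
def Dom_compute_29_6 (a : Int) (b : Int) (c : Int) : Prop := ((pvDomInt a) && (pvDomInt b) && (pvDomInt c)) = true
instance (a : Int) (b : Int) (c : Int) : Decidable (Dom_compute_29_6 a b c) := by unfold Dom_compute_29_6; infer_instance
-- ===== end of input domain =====

-- B replaces A's paired fold with a tail recursion over x alone; y's loop effect is a closed-form constant.

-- ===== PORT A =====
def compute_29_6 (a : Int) (b : Int) (c : Int) : Int :=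
  let x := a * 512 + b * 421
  let y := c * 352 - a * 273
  let p := (PySem.List.pyRange 0 20 1).foldl (fun (p : Int × Int) i =>
    let x := p.1 + i * 94
    let y := p.2 - i * 42
    let x := if x > 7960 then PySem.Int.mod x 2480 else x
    (x, y)) (x, y)
  p.1 + p.2 + 175

-- ===== PORT B =====
-- tail-recursive helper 'go' from Source B; the ≥ 20 guard is the recursion's base case
def computeGo (x : Int) (i : Nat) : Int :=
  if 20 ≤ i then x
  else
    let x := x + (i : Int) * 94
    let x := if x > 7960 then PySem.Int.mod x 2480 else x
    computeGo x (i + 1)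
termination_by 20 - i

def compute_29_6_alt (a : Int) (b : Int) (c : Int) : Int :=
  computeGo (a * 512 + b * 421) 0 + c * 352 - a * 273 - 7805

-- ===== PRECONDITION & SPEC =====
def Spec_compute_29_6 (a : Int) (b : Int) (c : Int) (out : Int) : Prop := out = compute_29_6_alt a b c
instance (a : Int) (b : Int) (c : Int) (out : Int) : Decidable (Spec_compute_29_6 a b c out) := by unfold Spec_compute_29_6; infer_instance

-- ===== CLAIM =====
def Claim_equal_compute_29_6 : Prop := ∀ (a : Int) (b : Int) (c : Int), Dom_compute_29_6 a b c → Spec_compute_29_6 a b c (compute_29_6 a b c)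

-- ===== LEMMAS AND PROOFS =====

-- A's paired loop splits: the first component is an x-only fold, the second subtracts 42 * sum.
theorem pair_loop_split (l : List Int) (x y : Int) :
    l.foldl (fun (p : Int × Int) i =>
      let x := p.1 + i * 94
      let y := p.2 - i * 42
      let x := if x > 7960 then PySem.Int.mod x 2480 else x
      (x, y)) (x, y)
    = (l.foldl (fun (x : Int) i =>
        let x := x + i * 94
        if x > 7960 then PySem.Int.mod x 2480 else x) x,
       y - 42 * l.sum) := by
  induction l generalizing x y with
  | nil => simp
  | cons h t ih =>
      simp only [List.foldl_cons, List.sum_cons, ih]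
      simp only [Prod.mk.injEq]
      exact ⟨trivial, by ring⟩

-- B's tail recursion computes the same x-fold over the remaining indices.
theorem computeGo_eq_foldl (n i : Nat) (h : i + n = 20) (x : Int) :
    computeGo x i = (PySem.List.pyRange (i : Int) 20 1).foldl (fun (x : Int) j =>
      let x := x + j * 94
      if x > 7960 then PySem.Int.mod x 2480 else x) x := by
  induction n generalizing i x with
  | zero =>
      rw [computeGo]
      simp [show (20:Nat) ≤ i by omega, show PySem.List.pyRange (i:Int) 20 1 = [] from by
        subst h; decide]
  | succ n ih =>
      rw [computeGo]
      have hi : ¬ (20 ≤ i) := by omega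
      rw [if_neg hi]
      rw [PySem.List.pyRange_one_cons (by omega : (i:Int) < 20)]
      simp only [List.foldl_cons]
      have : ((i:Int) + 1) = ((i+1 : Nat) : Int) := by push_cast; ring
      rw [ih (i+1) (by omega), ← this]

theorem compute_29_6_spec : Claim_equal_compute_29_6 := by
  intro a b c _
  show compute_29_6 a b c = compute_29_6_alt a b c
  simp only [compute_29_6, compute_29_6_alt, pair_loop_split]
  rw [computeGo_eq_foldl 20 0 rfl]
  have hs : (PySem.List.pyRange 0 20 1).sum = 190 := by decide
  norm_num [hs]
  ring
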